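-- pv_equiv track=rewrite | github.com/bmoe/AOC2018 | 11-prog.py | n_bys
-- ===== SOURCE A (Python) =====
-- import collections
--
-- def n_bys(power, nx=300, ny=300, n=3):
--     grid = collections.defaultdict(lambda: 0)
--
--     # 1 2 3 4 5 6 7 8
--     # nx = 8  n = 3
--     # max_x = 8 - (3-1)
--
--     max_x = nx - (n - 1)
--     max_y = ny - (n - 1)
--     for x in range(1, max_x + 1):
--         for y in range(1, max_y + 1):
--             for i in range(0, n):
--                 for j in range(0, n):
--                     grid[(x, y)] += power[(x+i, y+j)]
--     return grid
-- ===== SOURCE B (Python) =====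
-- def n_bys(power, nx=300, ny=300, n=3):
--     max_x = nx - (n - 1)
--     max_y = ny - (n - 1)
--     out = {}
--     if n < 1 or max_x < 1 or max_y < 1:
--         return out
--     # summed-area table: S[x][y] = sum of power over [1..x] x [1..y]; row 0 / column 0 are zero
--     S = [[0] * (ny + 1)]
--     for x in range(1, nx + 1):
--         prev = S[x - 1]
--         row = [0]
--         acc = 0
--         for y in range(1, ny + 1):
--             acc += power[(x, y)]
--             row.append(prev[y] + acc)
--         S.append(row)
--     for x in range(1, max_x + 1):
--         for y in range(1, max_y + 1):
--             out[(x, y)] = (S[x + n - 1][y + n - 1] - S[x - 1][y + n - 1]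
--                            - S[x + n - 1][y - 1] + S[x - 1][y - 1])
--     return out
-- ===== Notes on version B (the rewrite author's own statement) =====
-- stated objective: alternative
-- what changed: replaces the quadruple loop (re-summing the n×n window from scratch for every cell) by a 2D summed-area table built in one pass, from which each window sum is four table lookups
import Mathlib
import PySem

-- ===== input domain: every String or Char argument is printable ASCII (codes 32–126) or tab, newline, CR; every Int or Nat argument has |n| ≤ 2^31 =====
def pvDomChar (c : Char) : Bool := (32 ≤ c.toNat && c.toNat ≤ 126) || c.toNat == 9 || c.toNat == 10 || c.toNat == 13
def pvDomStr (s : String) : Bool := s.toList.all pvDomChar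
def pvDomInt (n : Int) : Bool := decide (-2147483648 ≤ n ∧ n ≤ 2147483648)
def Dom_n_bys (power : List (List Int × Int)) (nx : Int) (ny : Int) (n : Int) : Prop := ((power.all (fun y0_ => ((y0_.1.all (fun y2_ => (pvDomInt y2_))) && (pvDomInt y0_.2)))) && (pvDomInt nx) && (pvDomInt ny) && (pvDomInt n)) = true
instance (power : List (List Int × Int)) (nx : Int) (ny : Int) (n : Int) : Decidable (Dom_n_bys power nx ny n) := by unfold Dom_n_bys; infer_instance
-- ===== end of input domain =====

-- B replaces A's per-cell n×n re-summation by a 2D summed-area table (one pass, four lookups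
-- per cell): a different algorithm computing exactly the same window-sum dict.


-- ===== PORT A =====
-- Python's power[(x+i, y+j)] raises KeyError on a missing key; Pre_n_bys guarantees every
-- accessed key is present, so the port reads it with getD 0 (exact on Pre_).
def n_bys (power : List (List Int × Int)) (nx : Int) (ny : Int) (n : Int) : List (List Int × Int) :=
  let pw : PySem.Dict (List Int) Int := PySem.Dict.mk power
  let grid : PySem.Dict (List Int) Int := PySem.Dict.empty
  let max_x := nx - (n - 1)
  let max_y := ny - (n - 1)
  let grid := (PySem.List.pyRange 1 (max_x + 1) 1).foldl (fun g x =>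
    (PySem.List.pyRange 1 (max_y + 1) 1).foldl (fun g y =>
      (PySem.List.pyRange 0 n 1).foldl (fun g i =>
        (PySem.List.pyRange 0 n 1).foldl (fun g j =>
          g.modify [x, y] 0 (fun v => v + pw.getD [x + i, y + j] 0)) g) g) g) grid
  grid.items

-- ===== PORT B =====
-- literal transliteration of Source B (summed-area table); power[(x, y)] read with getD 0 as above
def n_bys_alt (power : List (List Int × Int)) (nx : Int) (ny : Int) (n : Int) : List (List Int × Int) :=
  let pw : PySem.Dict (List Int) Int := PySem.Dict.mk power
  let max_x := nx - (n - 1)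
  let max_y := ny - (n - 1)
  let out : PySem.Dict (List Int) Int := PySem.Dict.empty
  if n < 1 ∨ max_x < 1 ∨ max_y < 1 then out.items
  else
    let S0 : List (List Int) := [List.replicate (ny + 1).toNat 0]
    let S := (PySem.List.pyRange 1 (nx + 1) 1).foldl (fun S x =>
        let prev := PySem.List.pyGetD S (x - 1) []
        let row := ((PySem.List.pyRange 1 (ny + 1) 1).foldl (fun (st : List Int × Int) y =>
            let acc := st.2 + pw.getD [x, y] 0
            (st.1 ++ [PySem.List.pyGetD prev y 0 + acc], acc)) ([0], 0)).1
        S ++ [row]) S0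
    let out := (PySem.List.pyRange 1 (max_x + 1) 1).foldl (fun out x =>
        (PySem.List.pyRange 1 (max_y + 1) 1).foldl (fun out y =>
          out.insert [x, y]
            (PySem.List.pyGetD (PySem.List.pyGetD S (x + n - 1) []) (y + n - 1) 0
             - PySem.List.pyGetD (PySem.List.pyGetD S (x - 1) []) (y + n - 1) 0
             - PySem.List.pyGetD (PySem.List.pyGetD S (x + n - 1) []) (y - 1) 0
             + PySem.List.pyGetD (PySem.List.pyGetD S (x - 1) []) (y - 1) 0)) out) out
    out.items

-- ===== PRECONDITION & SPEC =====
-- Pre_ excludes exactly the inputs on which Python A raises KeyError: whenever the loops run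
-- (n ≥ 1 and both ranges nonempty) every key (u, v) with 1 ≤ u ≤ nx, 1 ≤ v ≤ ny must be present
-- in power — stated as a count (the number of DISTINCT keys of that shape equals nx * ny), which
-- is the same condition and is checkable by scanning power alone, with no grid enumeration.
def Pre_n_bys (power : List (List Int × Int)) (nx : Int) (ny : Int) (n : Int) : Prop :=
  (1 ≤ n ∧ 1 ≤ nx - (n - 1) ∧ 1 ≤ ny - (n - 1)) →
    ((((PySem.Set.ofList (power.map (·.1))).filter (fun k =>
        match k with
        | [u, v] => decide (1 ≤ u ∧ u ≤ nx ∧ 1 ≤ v ∧ v ≤ ny)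
        | _ => false)).length : Int) = nx * ny)
instance (power : List (List Int × Int)) (nx : Int) (ny : Int) (n : Int) : Decidable (Pre_n_bys power nx ny n) := by unfold Pre_n_bys; infer_instance
def pvWitness_n_bys : (List (List Int × Int)) × Int × Int × Int :=
  ([([1, 1], 1), ([1, 2], 2), ([2, 1], 3), ([2, 2], -4)], 2, 2, 2)
def Spec_n_bys (power : List (List Int × Int)) (nx : Int) (ny : Int) (n : Int) (out : List (List Int × Int)) : Prop := out = n_bys_alt power nx ny n
instance (power : List (List Int × Int)) (nx : Int) (ny : Int) (n : Int) (out : List (List Int × Int)) : Decidable (Spec_n_bys power nx ny n out) := by unfold Spec_n_bys; infer_instance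

-- ===== CLAIM (what is proved, stated in full; the proofs are below) =====
def Claim_equal_n_bys : Prop := ∀ (power : List (List Int × Int)) (nx : Int) (ny : Int) (n : Int), Dom_n_bys power nx ny n → Pre_n_bys power nx ny n → Spec_n_bys power nx ny n (n_bys power nx ny n)

-- ===== LEMMAS AND PROOFS =====

-- q pw u v = the power value at (u, v); colS = prefix sum along a row; P = 2D prefix sum;
-- T = the n×n window sum A computes per cell.
def pvQ (pw : PySem.Dict (List Int) Int) (u v : Int) : Int := pw.getD [u, v] 0
def pvColS (pw : PySem.Dict (List Int) Int) (x y : Int) : Int :=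
  ((PySem.List.pyRange 1 (y + 1) 1).map (fun v => pvQ pw x v)).sum
def pvP (pw : PySem.Dict (List Int) Int) (x y : Int) : Int :=
  ((PySem.List.pyRange 1 (x + 1) 1).map (fun u => pvColS pw u y)).sum
def pvT (pw : PySem.Dict (List Int) Int) (x y n : Int) : Int :=
  ((PySem.List.pyRange 0 n 1).map (fun i =>
    ((PySem.List.pyRange 0 n 1).map (fun j => pvQ pw (x + i) (y + j))).sum)).sum

theorem pv_sum_map_sub {α : Type} (l : List α) (f g : α → Int) :
    (l.map (fun a => f a - g a)).sum = (l.map f).sum - (l.map g).sum := by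
  induction l with
  | nil => simp
  | cons a t ih => simp [ih]; ring

theorem pv_sum_shift (f : Int → Int) (x n : Int) :
    ((PySem.List.pyRange 0 n 1).map (fun i => f (x + i))).sum
      = ((PySem.List.pyRange x (x + n) 1).map f).sum := by
  rw [PySem.List.pyRange_one, PySem.List.pyRange_one, List.map_map, List.map_map]
  rw [show n - 0 = n by ring, show x + n - x = n by ring]
  apply congrArg List.sum
  apply List.map_congr_left
  intro k _
  simp

theorem pv_modify_modify {κ : Type} [BEq κ] [LawfulBEq κ]
    (d : PySem.Dict κ Int) (k : κ) (a b : Int) :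
    (d.modify k 0 (fun v => v + a)).modify k 0 (fun v => v + b)
      = d.modify k 0 (fun v => v + (a + b)) := by
  simp [PySem.Dict.modify, PySem.Dict.getD_insert_self, PySem.Dict.insert_insert_self, add_assoc]

theorem pv_foldl_modify_add {κ α : Type} [BEq κ] [LawfulBEq κ]
    (l : List α) (f : α → Int) (k : κ) (g : PySem.Dict κ Int) (c : Int) :
    l.foldl (fun d a => d.modify k 0 (fun v => v + f a)) (g.modify k 0 (fun v => v + c))
      = g.modify k 0 (fun v => v + (c + (l.map f).sum)) := by
  induction l generalizing c with
  | nil => simp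
  | cons a t ih =>
    simp only [List.foldl_cons, pv_modify_modify, ih]
    simp [add_assoc]

theorem pv_foldl_modify_ne_nil {κ α : Type} [BEq κ] [LawfulBEq κ]
    (l : List α) (hl : l ≠ []) (f : α → Int) (k : κ) (g : PySem.Dict κ Int) :
    l.foldl (fun d a => d.modify k 0 (fun v => v + f a)) g
      = g.modify k 0 (fun v => v + (l.map f).sum) := by
  cases l with
  | nil => exact absurd rfl hl
  | cons a t =>
    simp only [List.foldl_cons, pv_foldl_modify_add]
    rw [List.map_cons, List.sum_cons]

theorem pv_items_foldl_modify_fresh {κ β : Type} [BEq κ] [LawfulBEq κ]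
    (l : List β) (k : β → κ) (f : β → Int → Int) (d : PySem.Dict κ Int)
    (hf : ∀ a ∈ l, d.contains (k a) = false) (hn : (l.map k).Nodup) :
    (l.foldl (fun d a => d.modify (k a) 0 (f a)) d).items
      = d.items ++ l.map (fun a => (k a, f a 0)) := by
  induction l generalizing d with
  | nil => simp
  | cons a t ih =>
    have ha : d.contains (k a) = false := hf a (by simp)
    have hstep : d.modify (k a) 0 (f a) = d.insert (k a) (f a 0) := by
      simp [PySem.Dict.modify, PySem.Dict.getD_of_not_contains d 0 ha]
    simp only [List.foldl_cons, hstep]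
    rw [ih (d.insert (k a) (f a 0))
        (by
          intro b hb
          rw [PySem.Dict.contains_insert]
          have h1 : (k b == k a) = false := by
            simp only [List.map_cons, List.nodup_cons] at hn
            have : k b ∈ t.map k := List.mem_map_of_mem hb
            simp [beq_eq_false_iff_ne]
            intro he; exact hn.1 (he ▸ this)
          simp [h1, hf b (List.mem_cons_of_mem _ hb)])
        (by simp only [List.map_cons, List.nodup_cons] at hn; exact hn.2)]
    rw [PySem.Dict.items_insert_of_not_contains d _ ha]
    simp

theorem pv_foldl_flatten {σ α β : Type} (xs : List α) (ys : List β)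
    (h : σ → α → β → σ) (g0 : σ) :
    xs.foldl (fun g x => ys.foldl (fun g y => h g x y) g) g0
      = (xs.flatMap (fun x => ys.map (fun y => (x, y)))).foldl (fun g p => h g p.1 p.2) g0 := by
  induction xs generalizing g0 with
  | nil => simp
  | cons x t ih => simp [List.foldl_append, List.foldl_map, ih]

theorem pv_nodup_pairs (xs ys : List Int) (hx : xs.Nodup) (hy : ys.Nodup) :
    ((xs.flatMap (fun x => ys.map (fun y => (x, y)))).map (fun p => [p.1, p.2])).Nodup := by
  induction xs with
  | nil => simp
  | cons x t ih =>
    simp only [List.flatMap_cons, List.map_append, List.map_map]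
    rw [List.nodup_append]
    refine ⟨?_, ih (List.nodup_cons.mp hx).2, ?_⟩
    · exact hy.map (by intro a b hab; simpa using hab)
    · intro a ha b hb
      rcases List.mem_map.mp ha with ⟨y, hyy, rfl⟩
      rcases List.mem_map.mp hb with ⟨p, hp, rfl⟩
      rcases List.mem_flatMap.mp hp with ⟨x', hx', hp'⟩
      rcases List.mem_map.mp hp' with ⟨y', hy', rfl⟩
      intro he
      simp only [Function.comp_apply, List.cons.injEq, and_true] at he
      exact (List.nodup_cons.mp hx).1 (by rw [he.1]; exact hx')

-- peeling the 2D window sum out of the prefix sums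
theorem pv_colS_diff (pw : PySem.Dict (List Int) Int) (u y n : Int) (hy : 1 ≤ y) (hn : 1 ≤ n) :
    pvColS pw u (y + n - 1) - pvColS pw u (y - 1)
      = ((PySem.List.pyRange 0 n 1).map (fun j => pvQ pw u (y + j))).sum := by
  unfold pvColS
  rw [pv_sum_shift (fun v => pvQ pw u v) y n]
  have : PySem.List.pyRange 1 (y + n - 1 + 1) 1
      = PySem.List.pyRange 1 (y - 1 + 1) 1 ++ PySem.List.pyRange (y - 1 + 1) (y + n - 1 + 1) 1 :=
    PySem.List.pyRange_one_append _ _ _ (by omega) (by omega)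
  rw [this, List.map_append, List.sum_append]
  have h2 : y - 1 + 1 = y := by ring
  have h3 : y + n - 1 + 1 = y + n := by ring
  rw [h2, h3]; ring

theorem pv_window (pw : PySem.Dict (List Int) Int) (x y n : Int)
    (hx : 1 ≤ x) (hy : 1 ≤ y) (hn : 1 ≤ n) :
    pvP pw (x + n - 1) (y + n - 1) - pvP pw (x - 1) (y + n - 1)
      - pvP pw (x + n - 1) (y - 1) + pvP pw (x - 1) (y - 1) = pvT pw x y n := by
  have hsplit : ∀ b : Int, pvP pw (x + n - 1) b - pvP pw (x - 1) b
      = ((PySem.List.pyRange x (x + n) 1).map (fun u => pvColS pw u b)).sum := by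
    intro b
    unfold pvP
    have : PySem.List.pyRange 1 (x + n - 1 + 1) 1
        = PySem.List.pyRange 1 (x - 1 + 1) 1 ++ PySem.List.pyRange (x - 1 + 1) (x + n - 1 + 1) 1 :=
      PySem.List.pyRange_one_append _ _ _ (by omega) (by omega)
    rw [this, List.map_append, List.sum_append]
    have h2 : x - 1 + 1 = x := by ring
    have h3 : x + n - 1 + 1 = x + n := by ring
    rw [h2, h3]; ring
  have : pvP pw (x + n - 1) (y + n - 1) - pvP pw (x - 1) (y + n - 1)
      - pvP pw (x + n - 1) (y - 1) + pvP pw (x - 1) (y - 1)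
      = ((PySem.List.pyRange x (x + n) 1).map
          (fun u => pvColS pw u (y + n - 1) - pvColS pw u (y - 1))).sum := by
    rw [pv_sum_map_sub, ← hsplit, ← hsplit]; ring
  rw [this]
  unfold pvT
  rw [← pv_sum_shift (fun u => pvColS pw u (y + n - 1) - pvColS pw u (y - 1)) x n]
  apply congrArg List.sum
  apply List.map_congr_left
  intro i _
  exact pv_colS_diff pw (x + i) y n hy hn

-- the inner double loop of A adds exactly the window sum pvT
theorem pv_A_inner (pw : PySem.Dict (List Int) Int) (g : PySem.Dict (List Int) Int)
    (x y n : Int) (hn : 1 ≤ n) :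
    (PySem.List.pyRange 0 n 1).foldl (fun g i =>
        (PySem.List.pyRange 0 n 1).foldl (fun g j =>
          g.modify [x, y] 0 (fun v => v + pw.getD [x + i, y + j] 0)) g) g
      = g.modify [x, y] 0 (fun v => v + pvT pw x y n) := by
  have hne : PySem.List.pyRange 0 n 1 ≠ [] := by
    rw [PySem.List.pyRange_one_cons (by omega : (0:Int) < n)]; simp
  have hstep : (fun (g : PySem.Dict (List Int) Int) (i : Int) =>
      (PySem.List.pyRange 0 n 1).foldl (fun g j =>
        g.modify [x, y] 0 (fun v => v + pw.getD [x + i, y + j] 0)) g)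
      = (fun g i => g.modify [x, y] 0 (fun v => v +
          ((PySem.List.pyRange 0 n 1).map (fun j => pvQ pw (x + i) (y + j))).sum)) := by
    funext g i
    exact pv_foldl_modify_ne_nil _ hne _ _ _
  rw [hstep, pv_foldl_modify_ne_nil _ hne _ _ _]
  rfl

-- prefix-sum recurrences
theorem pv_colS_zero (pw : PySem.Dict (List Int) Int) (x : Int) : pvColS pw x 0 = 0 := by
  unfold pvColS
  rw [PySem.List.pyRange_one_eq_nil (by omega)]
  simp

theorem pv_colS_succ (pw : PySem.Dict (List Int) Int) (x y : Int) (hy : 0 ≤ y) :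
    pvColS pw x (y + 1) = pvColS pw x y + pvQ pw x (y + 1) := by
  unfold pvColS
  rw [PySem.List.pyRange_one_succ_right (by omega : (1:Int) ≤ y + 1)]
  simp

theorem pv_P_zero_x (pw : PySem.Dict (List Int) Int) (y : Int) : pvP pw 0 y = 0 := by
  unfold pvP
  rw [PySem.List.pyRange_one_eq_nil (by omega)]
  simp

theorem pv_P_zero_y (pw : PySem.Dict (List Int) Int) (x : Int) : pvP pw x 0 = 0 := by
  unfold pvP
  have : ∀ u : Int, pvColS pw u 0 = 0 := fun u => pv_colS_zero pw u
  simp [this]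

theorem pv_P_succ_x (pw : PySem.Dict (List Int) Int) (x y : Int) (hx : 1 ≤ x) :
    pvP pw x y = pvP pw (x - 1) y + pvColS pw x y := by
  unfold pvP
  have h1 : x - 1 + 1 = x := by ring
  rw [h1, PySem.List.pyRange_one_succ_right (by omega : (1:Int) ≤ x)]
  simp

-- B's row fold builds one prefix-sum row
theorem pv_row_fold (pw : PySem.Dict (List Int) Int) (x ny : Int) (hx : 1 ≤ x)
    (m : Nat) (hm : (m : Int) ≤ ny) :
    (PySem.List.pyRange 1 ((m : Int) + 1) 1).foldl (fun (st : List Int × Int) y =>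
        (st.1 ++ [PySem.List.pyGetD ((PySem.List.pyRange 0 (ny + 1) 1).map
            (fun v => pvP pw (x - 1) v)) y 0 + (st.2 + pw.getD [x, y] 0)],
         st.2 + pw.getD [x, y] 0)) ([0], 0)
      = ((PySem.List.pyRange 0 ((m : Int) + 1) 1).map (fun v => pvP pw x v),
         pvColS pw x (m : Int)) := by
  induction m with
  | zero =>
    simp only [Nat.cast_zero, zero_add]
    rw [show PySem.List.pyRange 1 1 1 = ([] : List Int) from
          PySem.List.pyRange_one_eq_nil (by omega),
        show PySem.List.pyRange 0 1 1 = [0] from by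
          simpa using PySem.List.pyRange_one_singleton 0]
    simp [pv_P_zero_y, pv_colS_zero]
  | succ t ih =>
    have h1 : ((t + 1 : Nat) : Int) = ((t : Int) + 1) := by push_cast; ring
    rw [h1, PySem.List.pyRange_one_succ_right (by omega : (1:Int) ≤ (t : Int) + 1),
        List.foldl_append, ih (by omega)]
    have hget : PySem.List.pyGetD ((PySem.List.pyRange 0 (ny + 1) 1).map
        (fun v => pvP pw (x - 1) v)) ((t : Int) + 1) 0 = pvP pw (x - 1) ((t : Int) + 1) :=
      PySem.List.pyGetD_map_pyRange_of_nonneg _ _ _ _ (by omega) (by omega)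
    have hcol : pvColS pw x ((t : Int)) + pw.getD [x, (t : Int) + 1] 0
        = pvColS pw x ((t : Int) + 1) := by
      rw [pv_colS_succ pw x (t : Int) (by omega)]; rfl
    have hP : pvP pw (x - 1) ((t : Int) + 1) + pvColS pw x ((t : Int) + 1)
        = pvP pw x ((t : Int) + 1) := (pv_P_succ_x pw x ((t : Int) + 1) hx).symm
    rw [PySem.List.pyRange_one_succ_right (by omega : (0:Int) ≤ (t : Int) + 1), List.map_append]
    simp only [List.foldl_cons, List.foldl_nil, List.map_cons, List.map_nil, Prod.mk.injEq]
    refine ⟨?_, ?_⟩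
    · rw [hget]
      rw [show pvColS pw x ((t:Int)) + pw.getD [x, (t : Int) + 1] 0
            = pvColS pw x ((t : Int) + 1) from hcol]
      rw [hP]
    · exact hcol

-- B's outer fold builds the whole summed-area table
theorem pv_S_fold (pw : PySem.Dict (List Int) Int) (nx ny : Int) (hny : 0 ≤ ny)
    (m : Nat) (hm : (m : Int) ≤ nx) :
    (PySem.List.pyRange 1 ((m : Int) + 1) 1).foldl (fun S x =>
        let prev := PySem.List.pyGetD S (x - 1) []
        let row := ((PySem.List.pyRange 1 (ny + 1) 1).foldl (fun (st : List Int × Int) y =>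
            let acc := st.2 + pw.getD [x, y] 0
            (st.1 ++ [PySem.List.pyGetD prev y 0 + acc], acc)) ([0], 0)).1
        S ++ [row]) [List.replicate (ny + 1).toNat 0]
      = (PySem.List.pyRange 0 ((m : Int) + 1) 1).map (fun u =>
          (PySem.List.pyRange 0 (ny + 1) 1).map (fun v => pvP pw u v)) := by
  induction m with
  | zero =>
    simp only [Nat.cast_zero, zero_add]
    rw [show PySem.List.pyRange 1 1 1 = ([] : List Int) from
          PySem.List.pyRange_one_eq_nil (by omega),
        show PySem.List.pyRange 0 1 1 = [0] from by
          simpa using PySem.List.pyRange_one_singleton 0]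
    simp only [List.foldl_nil, List.map_cons, List.map_nil]
    congr 1
    symm
    rw [List.eq_replicate_iff]
    refine ⟨by simp [PySem.List.length_pyRange_one], ?_⟩
    intro b hb
    simp only [List.mem_map] at hb
    obtain ⟨v, _, rfl⟩ := hb
    exact pv_P_zero_x pw v
  | succ t ih =>
    have h1 : ((t + 1 : Nat) : Int) = ((t : Int) + 1) := by push_cast; ring
    rw [h1, PySem.List.pyRange_one_succ_right (by omega : (1:Int) ≤ (t : Int) + 1),
        List.foldl_append, ih (by omega)]
    simp only [List.foldl_cons, List.foldl_nil]
    have hprev : PySem.List.pyGetD ((PySem.List.pyRange 0 ((t : Int) + 1) 1).map (fun u =>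
          (PySem.List.pyRange 0 (ny + 1) 1).map (fun v => pvP pw u v))) ((t : Int) + 1 - 1) []
        = (PySem.List.pyRange 0 (ny + 1) 1).map (fun v => pvP pw ((t : Int) + 1 - 1) v) :=
      PySem.List.pyGetD_map_pyRange_of_nonneg _ _ _ _ (by omega) (by omega)
    rw [hprev]
    have hrow := pv_row_fold pw ((t : Int) + 1) ny (by omega) ny.toNat (by omega)
    rw [show ((ny.toNat : Int)) = ny by omega] at hrow
    rw [hrow]
    rw [PySem.List.pyRange_one_succ_right (by omega : (0:Int) ≤ (t : Int) + 1), List.map_append]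
    simp

-- membership in the flattened index list
theorem pv_mem_pairs (mx my : Int) (p : Int × Int)
    (hp : p ∈ (PySem.List.pyRange 1 (mx + 1) 1).flatMap (fun x =>
        (PySem.List.pyRange 1 (my + 1) 1).map (fun y => (x, y)))) :
    1 ≤ p.1 ∧ p.1 ≤ mx ∧ 1 ≤ p.2 ∧ p.2 ≤ my := by
  simp only [List.mem_flatMap, List.mem_map] at hp
  obtain ⟨x, hx, y, hy, rfl⟩ := hp
  rw [PySem.List.mem_pyRange_one] at hx hy
  exact ⟨by omega, by omega, by omega, by omega⟩

theorem n_bys_spec : Claim_equal_n_bys := by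
  intro power nx ny n _ _
  unfold Spec_n_bys n_bys n_bys_alt
  simp only []
  set pw : PySem.Dict (List Int) Int := PySem.Dict.mk power with hpw
  set mx := nx - (n - 1) with hmx
  set my := ny - (n - 1) with hmy
  by_cases hguard : n < 1 ∨ mx < 1 ∨ my < 1
  · -- degenerate case: A's loops add nothing, B returns the empty dict
    rw [if_pos hguard]
    rcases hguard with hn | hx | hy
    · have hez : PySem.List.pyRange 0 n 1 = [] := PySem.List.pyRange_one_eq_nil (by omega)
      simp [hez]
    · have hez : PySem.List.pyRange 1 (mx + 1) 1 = [] := PySem.List.pyRange_one_eq_nil (by omega)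
      simp [hez]
    · have hez : PySem.List.pyRange 1 (my + 1) 1 = [] := PySem.List.pyRange_one_eq_nil (by omega)
      simp [hez]
  · push Not at hguard
    obtain ⟨hn, hx, hy⟩ := hguard
    rw [if_neg (by push Not; exact ⟨by omega, by omega, by omega⟩)]
    have hnx : 1 ≤ nx := by omega
    have hny : 1 ≤ ny := by omega
    -- characterize B's table
    have hS := pv_S_fold pw nx ny (by omega) nx.toNat (by omega)
    rw [show ((nx.toNat : Int)) = nx by omega] at hS
    rw [hS]
    -- A: collapse the two inner loops into one modify of the window sum
    have hA : (fun (g : PySem.Dict (List Int) Int) (x : Int) =>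
        (PySem.List.pyRange 1 (my + 1) 1).foldl (fun g y =>
          (PySem.List.pyRange 0 n 1).foldl (fun g i =>
            (PySem.List.pyRange 0 n 1).foldl (fun g j =>
              g.modify [x, y] 0 (fun v => v + pw.getD [x + i, y + j] 0)) g) g) g)
        = (fun g x => (PySem.List.pyRange 1 (my + 1) 1).foldl (fun g y =>
            g.modify [x, y] 0 (fun v => v + pvT pw x y n)) g) := by
      funext g x
      congr 1
      funext g y
      exact pv_A_inner pw g x y n (by omega)
    rw [hA]
    -- flatten both double loops over the same index list
    rw [pv_foldl_flatten (PySem.List.pyRange 1 (mx + 1) 1) (PySem.List.pyRange 1 (my + 1) 1)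
        (fun g x y => PySem.Dict.modify g [x, y] 0 (fun v => v + pvT pw x y n)) PySem.Dict.empty]
    rw [pv_foldl_flatten (PySem.List.pyRange 1 (mx + 1) 1) (PySem.List.pyRange 1 (my + 1) 1)
        (fun g x y => PySem.Dict.insert g [x, y]
          (PySem.List.pyGetD (PySem.List.pyGetD ((PySem.List.pyRange 0 (nx + 1) 1).map (fun u =>
              (PySem.List.pyRange 0 (ny + 1) 1).map (fun v => pvP pw u v))) (x + n - 1) []) (y + n - 1) 0
           - PySem.List.pyGetD (PySem.List.pyGetD ((PySem.List.pyRange 0 (nx + 1) 1).map (fun u =>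
              (PySem.List.pyRange 0 (ny + 1) 1).map (fun v => pvP pw u v))) (x - 1) []) (y + n - 1) 0
           - PySem.List.pyGetD (PySem.List.pyGetD ((PySem.List.pyRange 0 (nx + 1) 1).map (fun u =>
              (PySem.List.pyRange 0 (ny + 1) 1).map (fun v => pvP pw u v))) (x + n - 1) []) (y - 1) 0
           + PySem.List.pyGetD (PySem.List.pyGetD ((PySem.List.pyRange 0 (nx + 1) 1).map (fun u =>
              (PySem.List.pyRange 0 (ny + 1) 1).map (fun v => pvP pw u v))) (x - 1) []) (y - 1) 0))
        PySem.Dict.empty]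
    set L := (PySem.List.pyRange 1 (mx + 1) 1).flatMap (fun x =>
        (PySem.List.pyRange 1 (my + 1) 1).map (fun y => (x, y))) with hL
    have hnodup : (L.map (fun p : Int × Int => [p.1, p.2])).Nodup :=
      pv_nodup_pairs _ _ (PySem.List.nodup_pyRange_one _ _) (PySem.List.nodup_pyRange_one _ _)
    rw [pv_items_foldl_modify_fresh L (fun p : Int × Int => [p.1, p.2])
        (fun p => fun v => v + pvT pw p.1 p.2 n) PySem.Dict.empty
        (fun a _ => PySem.Dict.contains_empty _) hnodup]
    rw [PySem.Dict.items_foldl_insert_fresh L (fun p : Int × Int => [p.1, p.2]) _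
        PySem.Dict.empty (fun a _ => PySem.Dict.contains_empty _) hnodup]
    simp only [PySem.Dict.empty, List.nil_append]
    apply List.map_congr_left
    intro p hp
    obtain ⟨h1, h2, h3, h4⟩ := pv_mem_pairs mx my p hp
    have gA : ∀ (a b : Int), 0 ≤ a → a ≤ nx → 0 ≤ b → b ≤ ny →
        PySem.List.pyGetD (PySem.List.pyGetD ((PySem.List.pyRange 0 (nx + 1) 1).map (fun u =>
          (PySem.List.pyRange 0 (ny + 1) 1).map (fun v => pvP pw u v))) a []) b 0 = pvP pw a b := by
      intro a b ha1 ha2 hb1 hb2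
      rw [PySem.List.pyGetD_map_pyRange_of_nonneg _ _ _ _ (by omega) (by omega)]
      exact PySem.List.pyGetD_map_pyRange_of_nonneg _ _ _ _ (by omega) (by omega)
    rw [gA _ _ (by omega) (by omega) (by omega) (by omega),
        gA _ _ (by omega) (by omega) (by omega) (by omega),
        gA _ _ (by omega) (by omega) (by omega) (by omega),
        gA _ _ (by omega) (by omega) (by omega) (by omega)]
    rw [pv_window pw p.1 p.2 n h1 h3 hn]
    simp
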